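-- pv_equiv track=rewrite | github.com/empa-scientific-it/python-tutorial | tutorial/tests/test_control_flow.py | reference_find_triplet
-- ===== SOURCE A (Python) =====
-- from typing import List, Tuple
--
-- def reference_find_triplet(nums: List[int]) -> int:
--     """Reference solution (part 2), O(n^2)"""
--     n = len(nums)
--     for i in range(n - 1):
--         s = set()
--         target_sum = 2020 - nums[i]
--         for j in range(i + 1, n):
--             last_num = target_sum - nums[j]
--             if last_num in s:
--                 return nums[i] * nums[j] * last_num
--             s.add(nums[j])
-- ===== SOURCE B (Python) =====
-- def reference_find_triplet(nums):
--     """Plain triple nested loop: j is the largest index of the triple, k strictly between i and j."""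
--     n = len(nums)
--     for i in range(n - 1):
--         for j in range(i + 1, n):
--             for k in range(i + 1, j):
--                 if nums[i] + nums[k] + nums[j] == 2020:
--                     return nums[i] * nums[j] * nums[k]
-- ===== Notes on version B (the rewrite author's own statement) =====
-- stated objective: simpler
-- what changed: Replaces the rolling hash-set of already-seen middle elements with a plain triple nested index loop (k strictly between i and j), which preserves A's (i,j) search order and returned product.
import Mathlib
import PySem

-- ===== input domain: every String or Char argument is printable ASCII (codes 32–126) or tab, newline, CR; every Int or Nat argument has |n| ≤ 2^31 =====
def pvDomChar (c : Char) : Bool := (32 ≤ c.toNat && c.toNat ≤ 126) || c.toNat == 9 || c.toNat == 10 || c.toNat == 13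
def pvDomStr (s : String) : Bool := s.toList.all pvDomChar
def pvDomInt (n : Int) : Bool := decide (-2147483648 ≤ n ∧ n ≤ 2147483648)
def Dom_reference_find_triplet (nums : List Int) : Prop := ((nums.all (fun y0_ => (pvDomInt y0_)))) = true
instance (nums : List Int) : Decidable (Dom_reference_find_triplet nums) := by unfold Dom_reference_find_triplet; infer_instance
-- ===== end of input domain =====

-- B replaces A's rolling hash-set of seen middle elements with a plain triple nested
-- loop (k strictly between i and j), same search order and returned product: simpler.

-- ===== PORT A =====
-- inner 'for j' loop of A: iterates over nums[i+1:], carrying the set s of seen elements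
def pvInnerA (ni target : Int) : List Int → PySem.Set Int → Option Int
  | [], _ => none
  | x :: rest, s =>
      let last := target - x
      if PySem.Set.contains s last then some (ni * x * last)
      else pvInnerA ni target rest (PySem.Set.add s x)

def reference_find_triplet : List Int → Option Int
  | [] => none
  | x :: rest =>
      match pvInnerA x (2020 - x) rest PySem.Set.empty with
      | some r => some r
      | none => reference_find_triplet rest

-- ===== PORT B =====
-- innermost 'for k' loop of B: mids = nums[i+1:j] in order
def pvScanK (ni nj : Int) : List Int → Option Int
  | [] => none
  | k :: ks => if ni + k + nj = 2020 then some (ni * nj * k) else pvScanK ni nj ks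

-- middle 'for j' loop of B, carrying the list mid = nums[i+1:j]
def pvScanJ (ni : Int) : List Int → List Int → Option Int
  | _, [] => none
  | mid, x :: rest =>
      match pvScanK ni x mid with
      | some r => some r
      | none => pvScanJ ni (mid ++ [x]) rest

def reference_find_triplet_alt : List Int → Option Int
  | [] => none
  | x :: rest =>
      match pvScanJ x [] rest with
      | some r => some r
      | none => reference_find_triplet_alt rest

-- ===== PRECONDITION & SPEC =====
def Spec_reference_find_triplet (nums : List Int) (out : Option Int) : Prop := out = reference_find_triplet_alt nums
instance (nums : List Int) (out : Option Int) : Decidable (Spec_reference_find_triplet nums out) := by unfold Spec_reference_find_triplet; infer_instance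

-- ===== CLAIM (what is proved, stated in full; the proofs are below) =====
def Claim_equal_reference_find_triplet : Prop := ∀ (nums : List Int), Dom_reference_find_triplet nums → Spec_reference_find_triplet nums (reference_find_triplet nums)

-- ===== LEMMAS AND PROOFS =====

lemma pvScanK_eq (ni nj : Int) (mid : List Int) :
    pvScanK ni nj mid =
      if (2020 - ni - nj) ∈ mid then some (ni * nj * (2020 - ni - nj)) else none := by
  induction mid with
  | nil => simp [pvScanK]
  | cons k ks ih =>
      by_cases h : ni + k + nj = 2020
      · have hk : k = 2020 - ni - nj := by omega
        subst hk
        simp [pvScanK, h]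
      · have hk : k ≠ 2020 - ni - nj := by omega
        simp [pvScanK, h, ih, hk.symm]

lemma pvInner_eq (ni : Int) :
    ∀ (l mid : List Int) (s : PySem.Set Int), (∀ y : Int, y ∈ s ↔ y ∈ mid) →
      pvInnerA ni (2020 - ni) l s = pvScanJ ni mid l := by
  intro l
  induction l with
  | nil => intro mid s _; simp [pvInnerA, pvScanJ]
  | cons x rest ih =>
      intro mid s hs
      have hmem : (2020 - ni - x) ∈ s ↔ (2020 - ni - x) ∈ mid := hs _
      by_cases h : (2020 - ni - x) ∈ mid
      · simp [pvInnerA, pvScanJ, pvScanK_eq, h, hmem.mpr h]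
      · have hns : (2020 - ni - x) ∉ s := fun hy => h (hmem.mp hy)
        have hc : PySem.Set.contains s (2020 - ni - x) = false := by
          simp only [Bool.eq_false_iff, ne_eq, PySem.Set.contains_iff]
          exact hns
        simp only [pvInnerA, pvScanJ, pvScanK_eq]
        rw [if_neg h]
        simp only [hc, Bool.false_eq_true, if_false]
        exact ih (mid ++ [x]) (PySem.Set.add s x)
          (by intro y; simp [PySem.Set.mem_add, hs y])

lemma pv_main (nums : List Int) :
    reference_find_triplet nums = reference_find_triplet_alt nums := by
  induction nums with
  | nil => rfl
  | cons x rest ih =>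
      have h := pvInner_eq x rest [] PySem.Set.empty (by simp [PySem.Set.empty])
      simp only [reference_find_triplet, reference_find_triplet_alt, h, ih]

-- ===== VERDICT =====
theorem reference_find_triplet_spec : Claim_equal_reference_find_triplet := by
  intro nums _
  unfold Spec_reference_find_triplet
  exact pv_main nums
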